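-- pv_equiv track=rewrite | github.com/Krastti/Hackaton-IT-Academy | src/analyzer.py | is_snils_valid
-- ===== SOURCE A (Python) =====
-- def is_snils_valid(snils: str) -> bool:
--     if len(snils) != 11 or not snils.isdigit():
--         return False
--
--     num, control = snils[:9], int(snils[9:])
--     if int(num) <= 1001998:
--         return True
--
--     checksum = sum(int(d) * (9 - i) for i, d in enumerate(num)) % 101
--     return (0 if checksum in (100, 101) else checksum) == control
-- ===== SOURCE B (Python) =====
-- def is_snils_valid(snils: str) -> bool:
--     if len(snils) != 11 or not snils.isdigit():
--         return False
--
--     num, control = snils[:9], int(snils[9:])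
--     if int(num) <= 1001998:
--         return True
--
--     # sum of prefix sums of the digits equals the weighted sum with weights 9..1
--     running = 0
--     total = 0
--     for d in num:
--         running += int(d)
--         total += running
--     checksum = total % 101
--     return (0 if checksum == 100 else checksum) == control
-- ===== Notes on version B (the rewrite author's own statement) =====
-- stated objective: alternative
-- what changed: Replaces the enumerate-based weighted digit sum (weights 9..1) with a single forward loop that accumulates a running digit total and the sum of those prefix sums, and drops A's test for a remainder value that a modulus can never produce.
import Mathlib
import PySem

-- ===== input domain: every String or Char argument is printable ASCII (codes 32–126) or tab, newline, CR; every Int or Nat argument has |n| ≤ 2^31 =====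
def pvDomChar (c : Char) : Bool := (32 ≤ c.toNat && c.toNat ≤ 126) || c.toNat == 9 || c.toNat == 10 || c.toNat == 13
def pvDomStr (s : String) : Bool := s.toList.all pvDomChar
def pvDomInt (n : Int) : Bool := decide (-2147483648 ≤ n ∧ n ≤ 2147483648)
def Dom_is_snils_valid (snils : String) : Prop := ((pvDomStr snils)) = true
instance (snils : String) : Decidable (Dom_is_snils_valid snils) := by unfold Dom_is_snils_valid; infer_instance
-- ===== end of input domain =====

-- B replaces A's enumerate-based weighted digit sum (weights 9..1) by a running-prefix-sum loop; same return value everywhere.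

-- ===== PORT A =====
-- int(d) for a single character d (guarded by isdigit, so ofChars? never fails; 0 default is unreachable)
def pyIntDigitA (c : Char) : Int := (PySem.Int.ofChars? [c]).getD 0

def is_snils_valid (snils : String) : Bool :=
  let cs := snils.toList
  if cs.length ≠ 11 ∨ ¬ PySem.Chars.strIsdigit cs then false
  else
    let num := PySem.List.slice cs none (some 9)
    -- int(num), int(snils[9:]): cannot fail under the isdigit guard; the none branch is an unreachable totalization
    match PySem.Int.ofChars? num, PySem.Int.ofChars? (PySem.List.slice cs (some 9) none) with
    | some n, some control =>
        if n ≤ 1001998 then true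
        else
          let checksum :=
            PySem.Int.mod
              ((PySem.List.enumerate num 0).foldl (fun acc p => acc + pyIntDigitA p.2 * (9 - p.1)) 0) 101
          (if checksum = 100 ∨ checksum = 101 then (0 : Int) else checksum) == control
    | _, _ => false

-- ===== PORT B =====
-- int(d), same guarded single-digit conversion on B's side
def pyIntDigitB (c : Char) : Int := (PySem.Int.ofChars? [c]).getD 0

def is_snils_valid_alt (snils : String) : Bool :=
  let cs := snils.toList
  if cs.length ≠ 11 ∨ ¬ PySem.Chars.strIsdigit cs then false
  else
    let num := PySem.List.slice cs none (some 9)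
    match PySem.Int.ofChars? num with
    | none => false
    | some n =>
      match PySem.Int.ofChars? (PySem.List.slice cs (some 9) none) with
      | none => false
      | some control =>
        if n ≤ 1001998 then true
        else
          let st := num.foldl (fun (p : Int × Int) c => (p.1 + pyIntDigitB c, p.2 + p.1 + pyIntDigitB c)) (0, 0)
          let checksum := PySem.Int.mod st.2 101
          (if checksum = 100 then (0 : Int) else checksum) == control

-- ===== PRECONDITION & SPEC =====
def Spec_is_snils_valid (snils : String) (out : Bool) : Prop := out = is_snils_valid_alt snils
instance (snils : String) (out : Bool) : Decidable (Spec_is_snils_valid snils out) := by unfold Spec_is_snils_valid; infer_instance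

-- ===== CLAIM (what is proved, stated in full; the proofs are below) =====
def Claim_equal_is_snils_valid : Prop := ∀ (snils : String), Dom_is_snils_valid snils → Spec_is_snils_valid snils (is_snils_valid snils)

-- ===== LEMMAS AND PROOFS =====

-- reference sum: wsum cs k = Σ_i digit(cs[i]) * (k - i)
def wsum : List Char → Int → Int
  | [], _ => 0
  | c :: cs, k => pyIntDigitA c * k + wsum cs (k - 1)

theorem digitAB (c : Char) : pyIntDigitB c = pyIntDigitA c := rfl

theorem foldA_eq_wsum (xs : List Char) (s acc : Int) :
    (PySem.List.enumerate xs s).foldl (fun acc p => acc + pyIntDigitA p.2 * (9 - p.1)) acc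
      = acc + wsum xs (9 - s) := by
  induction xs generalizing s acc with
  | nil => simp [PySem.List.enumerate_nil, wsum]
  | cons c cs ih =>
      rw [PySem.List.enumerate_cons]
      simp only [List.foldl_cons, ih, wsum]
      ring_nf

theorem foldB_eq_wsum (xs : List Char) (r t : Int) :
    (xs.foldl (fun (p : Int × Int) c => (p.1 + pyIntDigitB c, p.2 + p.1 + pyIntDigitB c)) (r, t)).2
      = t + (xs.length : Int) * r + wsum xs (xs.length : Int) := by
  induction xs generalizing r t with
  | nil => simp [wsum]
  | cons c cs ih =>
      simp only [List.foldl_cons, ih, wsum, List.length_cons]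
      rw [digitAB c]
      push_cast
      ring_nf

-- ===== VERDICT (by name: the statement is the Claim_ definition above) =====
theorem is_snils_valid_spec : Claim_equal_is_snils_valid := by
  intro snils _
  unfold Spec_is_snils_valid is_snils_valid is_snils_valid_alt
  set cs := snils.toList with hcs
  by_cases hg : cs.length ≠ 11 ∨ ¬ PySem.Chars.strIsdigit cs
  · rw [if_pos hg, if_pos hg]
  · rw [if_neg hg, if_neg hg]
    have hlen : cs.length = 11 := by
      rcases not_or.mp hg with ⟨h1, _⟩; omega
    have hnum : (PySem.List.slice cs none (some 9)).length = 9 := by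
      rw [show (9 : Int) = ((9 : Nat) : Int) from rfl, PySem.List.slice_to_natCast,
        List.length_take, hlen]
      omega
    cases h1 : PySem.Int.ofChars? (PySem.List.slice cs none (some 9)) with
    | none => cases h2 : PySem.Int.ofChars? (PySem.List.slice cs (some 9) none) <;> simp only [h1, h2]
    | some n =>
      cases h2 : PySem.Int.ofChars? (PySem.List.slice cs (some 9) none) with
      | none => simp only [h1, h2]
      | some control =>
        simp only [h1, h2]
        by_cases hn : n ≤ 1001998
        · rw [if_pos hn, if_pos hn]
        · rw [if_neg hn, if_neg hn]
          have hA := foldA_eq_wsum (PySem.List.slice cs none (some 9)) 0 0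
          have hB := foldB_eq_wsum (PySem.List.slice cs none (some 9)) 0 0
          rw [hnum] at hB
          norm_num at hA hB
          rw [hA, hB]
          have hlt : PySem.Int.mod (wsum (PySem.List.slice cs none (some 9)) 9) 101 < 101 :=
            PySem.Int.mod_lt _ (by norm_num)
          rcases eq_or_ne (PySem.Int.mod (wsum (PySem.List.slice cs none (some 9)) 9) 101) 100 with h | h
          · rw [if_pos (Or.inl h), if_pos h]
          · rw [if_neg (by push_neg; exact ⟨h, by omega⟩), if_neg h]
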